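-- pv_equiv track=rewrite | github.com/perrze/ctf401 | players/players.py | patchKeys
-- ===== SOURCE A (Python) =====
-- def patchKeys(valid_keys_list, rq):
--     provided_keys = []
--     for key in rq:
--         try:
--             if (key in valid_keys_list) and (key not in provided_keys):
--                 provided_keys.append(key)
--         except KeyError:
--             pass
--     if len(provided_keys) > 0:
--         return provided_keys, True
--     else:
--         return provided_keys, False
-- ===== SOURCE B (Python) =====
-- def patchKeys(valid_keys_list, rq):
--     # traverse valid_keys_list instead of rq: collect the valid keys that occur in rq,
--     # then order them by their first position in rq (rq.index), which is A's output order
--     hits = {key for key in valid_keys_list if key in rq}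
--     provided_keys = sorted(hits, key=rq.index)
--     return provided_keys, bool(provided_keys)
-- ===== Notes on version B (the rewrite author's own statement) =====
-- stated objective: alternative
-- what changed: B traverses valid_keys_list instead of rq: it collects the set of valid keys occurring in rq with a set comprehension and sorts them by their first position in rq (sorted(..., key=rq.index)), replacing A's scan of rq with an inline dedup test against the growing output list.
import Mathlib
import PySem

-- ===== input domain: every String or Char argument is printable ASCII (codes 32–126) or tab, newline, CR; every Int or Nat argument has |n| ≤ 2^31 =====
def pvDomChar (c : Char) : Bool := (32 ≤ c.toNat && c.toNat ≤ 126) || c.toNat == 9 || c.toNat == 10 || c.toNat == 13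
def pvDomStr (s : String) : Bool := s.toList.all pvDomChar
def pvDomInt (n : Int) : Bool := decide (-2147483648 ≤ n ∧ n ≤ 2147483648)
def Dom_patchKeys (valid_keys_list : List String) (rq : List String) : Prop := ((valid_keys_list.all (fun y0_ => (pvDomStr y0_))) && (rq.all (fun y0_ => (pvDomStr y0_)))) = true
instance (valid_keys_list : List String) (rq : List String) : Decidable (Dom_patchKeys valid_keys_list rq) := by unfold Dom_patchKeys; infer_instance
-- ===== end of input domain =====

-- B reverses the traversal: instead of A's single scan of rq with an inline dedup test
-- against the growing output, B filters valid_keys_list for keys occurring in rq and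
-- sorts the resulting set by first position in rq (rq.index); objective: alternative.


-- ===== PORT A =====
-- the try/except KeyError around a list-membership test can never fire; the body is ported directly
def patchKeys (valid_keys_list : List String) (rq : List String) : List String × Bool :=
  let provided_keys := rq.foldl
    (fun acc key => if key ∈ valid_keys_list ∧ key ∉ acc then acc ++ [key] else acc) []
  if provided_keys.length > 0 then (provided_keys, true) else (provided_keys, false)

-- ===== PORT B =====
-- set comprehension over valid_keys_list → PySem.Set.ofList of the filtered list;
-- sorted(hits, key=rq.index): every element of hits is in rq, so rq.index returns its
-- first index (index? is some there; the .getD 0 default is never used), and the key is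
-- injective on hits, so the sort is independent of the set's iteration order
def patchKeys_alt (valid_keys_list : List String) (rq : List String) : List String × Bool :=
  let hits : PySem.Set String :=
    PySem.Set.ofList (valid_keys_list.filter (fun key => decide (key ∈ rq)))
  let provided_keys := PySem.List.sorted hits (fun k => (PySem.List.index? rq k).getD 0)
  (provided_keys, decide (provided_keys ≠ []))

-- ===== PRECONDITION & SPEC =====
def Spec_patchKeys (valid_keys_list : List String) (rq : List String) (out : List String × Bool) : Prop := out = patchKeys_alt valid_keys_list rq
instance (valid_keys_list : List String) (rq : List String) (out : List String × Bool) : Decidable (Spec_patchKeys valid_keys_list rq out) := by unfold Spec_patchKeys; infer_instance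

-- ===== CLAIM (what is proved, stated in full; the proofs are below) =====
def Claim_equal_patchKeys : Prop := ∀ (valid_keys_list : List String) (rq : List String), Dom_patchKeys valid_keys_list rq → Spec_patchKeys valid_keys_list rq (patchKeys valid_keys_list rq)

-- ===== LEMMAS AND PROOFS =====

-- Invariant for A's loop: the accumulator is the membership-filter of the set of keys seen so far.
theorem patchKeys_loop_invariant (v : List String) :
    ∀ (rq seen : List String),
      rq.foldl (fun acc key => if key ∈ v ∧ key ∉ acc then acc ++ [key] else acc)
        (seen.filter (fun k => decide (k ∈ v)))
      = (rq.foldl PySem.Set.add seen).filter (fun k => decide (k ∈ v)) := by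
  intro rq
  induction rq with
  | nil => intro seen; simp [List.foldl]
  | cons key rest ih =>
    intro seen
    simp only [List.foldl_cons]
    have hmem : (key ∈ seen.filter (fun k => decide (k ∈ v))) ↔ (key ∈ seen ∧ key ∈ v) := by
      simp
    by_cases hs : key ∈ seen
    · have hadd : PySem.Set.add seen key = seen := by
        simp [PySem.Set.add, PySem.Set.contains, hs]
      by_cases hv : key ∈ v
      · rw [if_neg (by tauto), hadd]; exact ih seen
      · rw [if_neg (by tauto), hadd]; exact ih seen
    · have hadd : PySem.Set.add seen key = seen ++ [key] := by
        simp [PySem.Set.add, PySem.Set.contains, hs]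
      have hnacc : key ∉ seen.filter (fun k => decide (k ∈ v)) := fun h => hs (hmem.mp h).1
      by_cases hv : key ∈ v
      · rw [if_pos ⟨hv, hnacc⟩, hadd]
        have : (seen ++ [key]).filter (fun k => decide (k ∈ v))
            = seen.filter (fun k => decide (k ∈ v)) ++ [key] := by
          simp [List.filter_append, hv]
        rw [← this]; exact ih (seen ++ [key])
      · rw [if_neg (by tauto), hadd]
        have : (seen ++ [key]).filter (fun k => decide (k ∈ v))
            = seen.filter (fun k => decide (k ∈ v)) := by
          simp [List.filter_append, hv]
        rw [← this]; exact ih (seen ++ [key])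

-- A's list is the valid-membership filter of the ordered deduplication of rq.
theorem patchKeys_A_eq_filter_dedup (v rq : List String) :
    rq.foldl (fun acc key => if key ∈ v ∧ key ∉ acc then acc ++ [key] else acc) []
    = (PySem.Set.ofList rq).filter (fun k => decide (k ∈ v)) := by
  have h1 := patchKeys_loop_invariant v rq []
  simp only [List.filter_nil] at h1
  rw [h1, PySem.Set.ofList_eq_foldl]

-- The ordered deduplication of rq is strictly increasing under first-index-in-rq.
theorem dedup_pairwise_index (rq : List String) :
    (PySem.Set.ofList rq).Pairwise
      (fun a b => (PySem.List.index? rq a).getD 0 < (PySem.List.index? rq b).getD 0) := by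
  induction rq with
  | nil => simp [PySem.Set.ofList]
  | cons x xs ih =>
    rw [PySem.Set.ofList_cons]
    constructor
    · intro b hb
      obtain ⟨hbs, hbne⟩ := (PySem.Set.mem_discard _ _ _).mp hb
      have hbxs : b ∈ xs := by
        have := PySem.Set.mem_ofList (xs := xs) (y := b)
        exact this.mp hbs
      obtain ⟨i, hi⟩ := Option.isSome_iff_exists.mp
        ((PySem.List.index?_isSome_iff xs b).mpr hbxs)
      rw [PySem.List.index?_cons_self, PySem.List.index?_cons_of_ne xs (Ne.symm hbne), hi]
      simp
    · have hsub : ((PySem.Set.ofList xs).discard x).Sublist (PySem.Set.ofList xs) := by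
        simp only [PySem.Set.discard]
        exact List.filter_sublist
      refine List.Pairwise.imp_of_mem ?_ (List.Pairwise.sublist hsub ih)
      intro a b ha hb hlt
      obtain ⟨has, hane⟩ := (PySem.Set.mem_discard _ _ _).mp ha
      obtain ⟨hbs, hbne⟩ := (PySem.Set.mem_discard _ _ _).mp hb
      have haxs : a ∈ xs := (PySem.Set.mem_ofList _ _).mp has
      have hbxs : b ∈ xs := (PySem.Set.mem_ofList _ _).mp hbs
      obtain ⟨i, hi⟩ := Option.isSome_iff_exists.mp ((PySem.List.index?_isSome_iff xs a).mpr haxs)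
      obtain ⟨j, hj⟩ := Option.isSome_iff_exists.mp ((PySem.List.index?_isSome_iff xs b).mpr hbxs)
      rw [PySem.List.index?_cons_of_ne xs (Ne.symm hane),
          PySem.List.index?_cons_of_ne xs (Ne.symm hbne), hi, hj]
      rw [hi, hj] at hlt
      simpa using hlt

-- B's sort names exactly A's list: it is a permutation of hits, strictly increasing in the key.
theorem patchKeys_lists_eq (v rq : List String) :
    PySem.List.sorted (PySem.Set.ofList (v.filter (fun key => decide (key ∈ rq))))
        (fun k => (PySem.List.index? rq k).getD 0)
    = (PySem.Set.ofList rq).filter (fun k => decide (k ∈ v)) := by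
  apply PySem.List.sorted_eq_of_perm_of_pairwise_lt
  · rw [List.perm_ext_iff_of_nodup
      ((PySem.Set.nodup_ofList rq).filter _) (PySem.Set.nodup_ofList _)]
    intro a
    simp [PySem.Set.mem_ofList, List.mem_filter, and_comm]
  · exact List.Pairwise.sublist List.filter_sublist (dedup_pairwise_index rq)

-- ===== VERDICT (by name: the statement is the Claim_ definition above) =====
theorem patchKeys_spec : Claim_equal_patchKeys := by
  intro v rq _
  unfold Spec_patchKeys patchKeys patchKeys_alt
  simp only [patchKeys_A_eq_filter_dedup v rq, patchKeys_lists_eq v rq]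
  set pk := (PySem.Set.ofList rq).filter (fun k => decide (k ∈ v)) with hpk
  by_cases h : pk.length > 0
  · have hne : pk ≠ [] := List.length_pos_iff.mp h
    simp [h, hne]
  · have he : pk = [] := List.length_eq_zero_iff.mp (by omega)
    simp [he]
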